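-- pv_equiv track=rewrite | github.com/sbstndb/subsetix | subsetix_cupy/benchmark_multishape.py | _rasterize_rectangles
-- ===== SOURCE A (Python) =====
-- from typing import Iterable, List, Sequence, Tuple
--
-- Rectangle = Tuple[int, int, int, int]
--
-- def _merge_intervals(intervals: List[Tuple[int, int]]) -> List[Tuple[int, int]]:
--     if not intervals:
--         return []
--     intervals.sort()
--     merged = [list(intervals[0])]
--     for start, end in intervals[1:]:
--         if start <= merged[-1][1]:
--             merged[-1][1] = max(merged[-1][1], end)
--         else:
--             merged.append([start, end])
--     return [(s, e) for s, e in merged if s < e]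
--
-- def _accumulate_rows(height: int) -> List[List[Tuple[int, int]]]:
--     return [[] for _ in range(height)]
--
-- def _rasterize_rectangles(
--     rectangles: Sequence[Rectangle], width: int, height: int
-- ) -> List[List[Tuple[int, int]]]:
--     rows = _accumulate_rows(height)
--     for x0, x1, y0, y1 in rectangles:
--         x0 = max(0, min(width, x0))
--         x1 = max(0, min(width, x1))
--         y0 = max(0, min(height, y0))
--         y1 = max(0, min(height, y1))
--         if x0 >= x1 or y0 >= y1:
--             continue
--         for y in range(y0, y1):
--             rows[y].append((x0, x1))
--     return [_merge_intervals(row) for row in rows]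
-- ===== SOURCE B (Python) =====
-- def _clip(rect, width, height):
--     x0, x1, y0, y1 = rect
--     cx0 = max(0, min(width, x0))
--     cx1 = max(0, min(width, x1))
--     cy0 = max(0, min(height, y0))
--     cy1 = max(0, min(height, y1))
--     if cx0 < cx1 and cy0 < cy1:
--         return (cx0, cx1, cy0, cy1)
--     return None
--
--
-- def _merge_sorted(pairs):
--     res = []
--     cur = None
--     for s, e in pairs:
--         if cur is None:
--             cur = (s, e)
--         elif s <= cur[1]:
--             if e > cur[1]:
--                 cur = (cur[0], e)
--         else:
--             res.append(cur)
--             cur = (s, e)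
--     if cur is not None:
--         res.append(cur)
--     return res
--
--
-- def _rasterize_rectangles(rectangles, width, height):
--     clipped = [c for c in (_clip(r, width, height) for r in rectangles) if c is not None]
--     bounds = sorted(set([0, height] + [c[2] for c in clipped] + [c[3] for c in clipped]))
--     out = [[] for _ in range(height)]
--     for b0, b1 in zip(bounds, bounds[1:]):
--         if b0 < 0 or b1 > height:
--             continue
--         merged = _merge_sorted(sorted((c[0], c[1]) for c in clipped if c[2] <= b0 < c[3]))
--         for y in range(b0, b1):
--             out[y] = list(merged)
--     return out
-- ===== Notes on version B (the rewrite author's own statement) =====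
-- stated objective: alternative
-- what changed: B replaces A's per-rectangle row-filling (appending each rectangle's interval into every covered row, then sorting and merging each of the H rows separately) by a y-boundary band sweep: it clips once, collects the distinct clipped y-boundaries, and sorts/merges the active intervals once per band of rows with a constant active set, copying the merged result to every row of the band.
import Mathlib
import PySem

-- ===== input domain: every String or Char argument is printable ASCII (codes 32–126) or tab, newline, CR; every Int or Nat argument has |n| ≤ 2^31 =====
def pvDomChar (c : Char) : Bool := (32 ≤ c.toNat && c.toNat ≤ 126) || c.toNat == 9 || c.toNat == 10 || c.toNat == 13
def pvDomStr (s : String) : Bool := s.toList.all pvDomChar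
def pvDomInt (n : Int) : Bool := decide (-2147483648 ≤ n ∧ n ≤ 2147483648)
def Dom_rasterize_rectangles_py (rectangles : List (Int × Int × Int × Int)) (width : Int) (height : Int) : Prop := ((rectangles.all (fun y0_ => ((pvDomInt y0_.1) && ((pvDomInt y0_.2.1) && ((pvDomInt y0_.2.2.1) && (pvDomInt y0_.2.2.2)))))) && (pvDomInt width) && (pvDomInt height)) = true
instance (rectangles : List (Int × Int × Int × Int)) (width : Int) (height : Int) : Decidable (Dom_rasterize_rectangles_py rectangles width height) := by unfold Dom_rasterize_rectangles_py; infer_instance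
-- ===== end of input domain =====

-- B replaces A's per-rectangle row-filling (append into every covered row, then sort+merge each of
-- the H rows) by a y-boundary band sweep that sorts+merges the active intervals once per band of
-- rows with a constant active set; objective: alternative algorithm (merge work per band, not per
-- row; not measurably faster on the generated inputs). Return values are proved equal on all inputs.

-- ===== PORT A =====
-- A's _merge_intervals inner loop: Python mutates merged[-1]; here 'm' is kept head-first
-- (head = Python's merged[-1]) and the final .reverse in merge_intervals_py restores Python order.
def pvMergeStepA (m : List (Int × Int)) (se : Int × Int) : List (Int × Int) :=
  match m with
  | [] => [se]   -- unreachable: the accumulator starts nonempty and never shrinks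
  | (ms, me) :: t => if se.1 ≤ me then (ms, max me se.2) :: t else se :: (ms, me) :: t

-- A's _merge_intervals: 'if not intervals: return []' and 'intervals[0]' / 'intervals[1:]' are the
-- match on the sorted list (sorted [] = [] exactly when intervals = []).
def merge_intervals_py (intervals : List (Int × Int)) : List (Int × Int) :=
  match PySem.List.sorted2 intervals Prod.fst Prod.snd with
  | [] => []
  | first :: rest =>
    ((rest.foldl pvMergeStepA [first]).reverse).filter (fun p => decide (p.1 < p.2))

-- the body of A's 'for x0, x1, y0, y1 in rectangles' loop; rows[y].append(t) is
-- pySetD rows y (pyGetD rows y [] ++ [t]); y ∈ [y0,y1) ⊆ [0,height) so indexing is Python-exact.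
def pvStepA (width height : Int) (rows : List (List (Int × Int))) (r : Int × Int × Int × Int) : List (List (Int × Int)) :=
  let x0 := max 0 (min width r.1)
  let x1 := max 0 (min width r.2.1)
  let y0 := max 0 (min height r.2.2.1)
  let y1 := max 0 (min height r.2.2.2)
  if x0 ≥ x1 ∨ y0 ≥ y1 then rows
  else (PySem.List.pyRange y0 y1 1).foldl
    (fun rows y => PySem.List.pySetD rows y ((PySem.List.pyGetD rows y []) ++ [(x0, x1)])) rows

def rasterize_rectangles_py (rectangles : List (Int × Int × Int × Int)) (width : Int) (height : Int) : List (List (Int × Int)) :=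
  let rows : List (List (Int × Int)) := (PySem.List.pyRange 0 height 1).map (fun _ => ([] : List (Int × Int)))
  (rectangles.foldl (pvStepA width height) rows).map merge_intervals_py

-- ===== PORT B =====
def pvClip (width height : Int) (r : Int × Int × Int × Int) : Option (Int × Int × Int × Int) :=
  let cx0 := max 0 (min width r.1)
  let cx1 := max 0 (min width r.2.1)
  let cy0 := max 0 (min height r.2.2.1)
  let cy1 := max 0 (min height r.2.2.2)
  if cx0 < cx1 ∧ cy0 < cy1 then some (cx0, cx1, cy0, cy1) else none

-- B's _merge_sorted: state = (res, cur); cur = None is 'none'.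
def pvMergeSorted (pairs : List (Int × Int)) : List (Int × Int) :=
  let st := pairs.foldl
    (fun (st : List (Int × Int) × Option (Int × Int)) (se : Int × Int) =>
      match st.2 with
      | none => (st.1, some se)
      | some cur =>
        if se.1 ≤ cur.2 then (st.1, some (if se.2 > cur.2 then (cur.1, se.2) else cur))
        else (st.1 ++ [cur], some se))
    ([], none)
  match st.2 with
  | none => st.1
  | some cur => st.1 ++ [cur]

-- the body of B's band loop 'for b0, b1 in zip(bounds, bounds[1:])'
def pvStepB (clipped : List (Int × Int × Int × Int)) (height : Int) (out : List (List (Int × Int))) (bb : Int × Int) : List (List (Int × Int)) :=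
  if bb.1 < 0 ∨ bb.2 > height then out
  else
    let merged := pvMergeSorted (PySem.List.sorted2
      ((clipped.filter (fun c => decide (c.2.2.1 ≤ bb.1 ∧ bb.1 < c.2.2.2))).map (fun c => (c.1, c.2.1)))
      Prod.fst Prod.snd)
    (PySem.List.pyRange bb.1 bb.2 1).foldl (fun out y => PySem.List.pySetD out y merged) out

def rasterize_rectangles_py_alt (rectangles : List (Int × Int × Int × Int)) (width : Int) (height : Int) : List (List (Int × Int)) :=
  let clipped := rectangles.filterMap (pvClip width height)
  let bounds := PySem.List.sorted
    (PySem.Set.ofList ([0, height] ++ clipped.map (fun c => c.2.2.1) ++ clipped.map (fun c => c.2.2.2)))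
    (fun x => x) false
  let out : List (List (Int × Int)) := (PySem.List.pyRange 0 height 1).map (fun _ => ([] : List (Int × Int)))
  (bounds.zip bounds.tail).foldl (pvStepB clipped height) out

-- ===== PRECONDITION & SPEC =====
def Spec_rasterize_rectangles_py (rectangles : List (Int × Int × Int × Int)) (width : Int) (height : Int) (out : List (List (Int × Int))) : Prop := out = rasterize_rectangles_py_alt rectangles width height
instance (rectangles : List (Int × Int × Int × Int)) (width : Int) (height : Int) (out : List (List (Int × Int))) : Decidable (Spec_rasterize_rectangles_py rectangles width height out) := by unfold Spec_rasterize_rectangles_py; infer_instance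

-- ===== CLAIM (what is proved, stated in full; the proofs are below) =====
def Claim_equal_rasterize_rectangles_py : Prop := ∀ (rectangles : List (Int × Int × Int × Int)) (width : Int) (height : Int), Dom_rasterize_rectangles_py rectangles width height → Spec_rasterize_rectangles_py rectangles width height (rasterize_rectangles_py rectangles width height)

-- ===== LEMMAS AND PROOFS =====

-- row y of the rasterized image, as a function of the clipped rectangle list
def pvSpecRow (cl : List (Int × Int × Int × Int)) (y : Int) : List (Int × Int) :=
  (cl.filter (fun c => decide (c.2.2.1 ≤ y ∧ y < c.2.2.2))).map (fun c => (c.1, c.2.1))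

-- value of row z after B's band loop over boundary list bs, starting from row function f
def pvBandVal (v : Int → List (Int × Int)) : List Int → (Int → List (Int × Int)) → Int → List (Int × Int)
  | [], f, z => f z
  | [_], f, z => f z
  | u0 :: u1 :: rest, f, z =>
      pvBandVal v (u1 :: rest) (fun w => if u0 ≤ w ∧ w < u1 then v u0 else f w) z

-- clean recursive form of interval merging on an already-sorted list
def pvMergeRec : (Int × Int) → List (Int × Int) → List (Int × Int)
  | cur, [] => [cur]
  | cur, se :: rest =>
      if se.1 ≤ cur.2 then pvMergeRec (cur.1, max cur.2 se.2) rest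
      else cur :: pvMergeRec se rest

def pvFinishB (st : List (Int × Int) × Option (Int × Int)) : List (Int × Int) :=
  match st.2 with
  | none => st.1
  | some cur => st.1 ++ [cur]

-- setting index y of a pyRange-indexed map rewrites the mapped function at y
lemma pv_set_map (h y : Int) (hy0 : 0 ≤ y) (f : Int → List (Int × Int)) (w : List (Int × Int)) :
    ((PySem.List.pyRange 0 h 1).map f).set y.toNat w
      = (PySem.List.pyRange 0 h 1).map (fun z => if z = y then w else f z) := by
  apply List.ext_getElem
  · simp
  · intro i h1 h2
    simp only [List.getElem_set, List.getElem_map]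
    rw [PySem.List.getElem_pyRange_one]
    by_cases hc : (i : Int) = y
    · have : y.toNat = i := by omega
      simp [this, hc]
    · have : ¬ (y.toNat = i) := by omega
      simp [this, hc]

-- generic row-fill: writing g y (rows[y]) for y in [y0,y1) updates the mapped function there
lemma pv_fill (h : Int) (g : Int → List (Int × Int) → List (Int × Int)) :
    ∀ (n : Nat) (y0 y1 : Int) (f : Int → List (Int × Int)), n = (y1 - y0).toNat → 0 ≤ y0 → y1 ≤ h →
      (PySem.List.pyRange y0 y1 1).foldl
        (fun rows y => PySem.List.pySetD rows y (g y (PySem.List.pyGetD rows y [])))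
        ((PySem.List.pyRange 0 h 1).map f)
      = (PySem.List.pyRange 0 h 1).map (fun z => if y0 ≤ z ∧ z < y1 then g z (f z) else f z) := by
  intro n
  induction n with
  | zero =>
    intro y0 y1 f hn h0 h1
    have hle : y1 ≤ y0 := by omega
    rw [PySem.List.pyRange_one_eq_nil hle]
    simp only [List.foldl_nil]
    apply List.map_congr_left
    intro z _
    have : ¬ (y0 ≤ z ∧ z < y1) := by omega
    simp [this]
  | succ n ih =>
    intro y0 y1 f hn h0 h1
    have hlt : y0 < y1 := by omega
    rw [PySem.List.pyRange_one_cons hlt]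
    simp only [List.foldl_cons]
    rw [PySem.List.pyGetD_map_pyRange_of_nonneg f h y0 [] h0 (by omega)]
    rw [PySem.List.pySetD_of_nonneg _ _ h0]
    rw [pv_set_map h y0 h0]
    rw [ih (y0 + 1) y1 _ (by omega) (by omega) h1]
    apply List.map_congr_left
    intro z _
    by_cases hz : z = y0
    · subst hz
      have hna : ¬ (z + 1 ≤ z ∧ z < y1) := by omega
      have hyy : z ≤ z ∧ z < y1 := by omega
      simp [hyy]
    · have hiff : (y0 + 1 ≤ z ∧ z < y1) ↔ (y0 ≤ z ∧ z < y1) := by omega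
      by_cases hb : y0 ≤ z ∧ z < y1
      · simp [hz, hb, hiff.mpr hb]
      · have hna2 : ¬ (y0 + 1 ≤ z ∧ z < y1) := fun hx => hb (hiff.mp hx)
        simp only [hz, hb]
        simp
        intro ha hb2
        exact absurd ⟨by omega, hb2⟩ hb

-- A's rectangle loop accumulates pvSpecRow of the clipped rectangles
lemma pv_A_rows (width height : Int) :
    ∀ (rects cl0 : List (Int × Int × Int × Int)),
      rects.foldl (pvStepA width height) ((PySem.List.pyRange 0 height 1).map (fun z => pvSpecRow cl0 z))
      = (PySem.List.pyRange 0 height 1).map (fun z => pvSpecRow (cl0 ++ rects.filterMap (pvClip width height)) z) := by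
  intro rects
  induction rects with
  | nil => intro cl0; simp
  | cons r rects ih =>
    intro cl0
    simp only [List.foldl_cons, List.filterMap_cons]
    by_cases hcl : (max 0 (min width r.1) < max 0 (min width r.2.1)
        ∧ max 0 (min height r.2.2.1) < max 0 (min height r.2.2.2))
    · -- rectangle survives clipping
      have hclip : pvClip width height r
          = some (max 0 (min width r.1), max 0 (min width r.2.1),
                  max 0 (min height r.2.2.1), max 0 (min height r.2.2.2)) := by
        unfold pvClip; rw [if_pos hcl]
      have hcond : ¬ (max 0 (min width r.1) ≥ max 0 (min width r.2.1)
          ∨ max 0 (min height r.2.2.1) ≥ max 0 (min height r.2.2.2)) := by omega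
      have hstep : pvStepA width height ((PySem.List.pyRange 0 height 1).map (fun z => pvSpecRow cl0 z)) r
          = (PySem.List.pyRange 0 height 1).map (fun z => pvSpecRow (cl0
              ++ [(max 0 (min width r.1), max 0 (min width r.2.1),
                   max 0 (min height r.2.2.1), max 0 (min height r.2.2.2))]) z) := by
        unfold pvStepA
        rw [if_neg hcond]
        have hfill := pv_fill height
          (fun _ cur => cur ++ [(max 0 (min width r.1), max 0 (min width r.2.1))])
          ((max 0 (min height r.2.2.2) - max 0 (min height r.2.2.1)).toNat)
          (max 0 (min height r.2.2.1)) (max 0 (min height r.2.2.2))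
          (fun z => pvSpecRow cl0 z) rfl (by omega) (by omega)
        simp only [] at hfill
        rw [hfill]
        apply List.map_congr_left
        intro z _
        unfold pvSpecRow
        rw [List.filter_append, List.map_append]
        by_cases hz : max 0 (min height r.2.2.1) ≤ z ∧ z < max 0 (min height r.2.2.2)
        · rw [if_pos hz]
          simp [hz.1, hz.2]
        · rw [if_neg hz]
          simp only [List.filter_cons, List.filter_nil]
          rw [if_neg (by simpa using hz)]
          simp
      rw [hstep, ih, hclip]
      simp
    · -- rectangle clipped away
      have hclip : pvClip width height r = none := by
        unfold pvClip; rw [if_neg hcl]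
      have hcond : (max 0 (min width r.1) ≥ max 0 (min width r.2.1)
          ∨ max 0 (min height r.2.2.1) ≥ max 0 (min height r.2.2.2)) := by omega
      have hstep : pvStepA width height ((PySem.List.pyRange 0 height 1).map (fun z => pvSpecRow cl0 z)) r
          = (PySem.List.pyRange 0 height 1).map (fun z => pvSpecRow cl0 z) := by
        unfold pvStepA; rw [if_pos hcond]
      rw [hstep, hclip, ih]

-- A's merge loop in terms of pvMergeRec
lemma pv_foldA : ∀ (rest : List (Int × Int)) (cur : Int × Int) (acc : List (Int × Int)),
    rest.foldl pvMergeStepA (cur :: acc) = (pvMergeRec cur rest).reverse ++ acc := by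
  intro rest
  induction rest with
  | nil => intro cur acc; simp [pvMergeRec]
  | cons se rest ih =>
    intro cur acc
    obtain ⟨cs, ce⟩ := cur
    simp only [List.foldl_cons, pvMergeStepA, pvMergeRec]
    by_cases hc : se.1 ≤ ce
    · rw [if_pos hc, if_pos hc, ih]
    · rw [if_neg hc, if_neg hc, ih]
      simp

-- B's merge loop in terms of pvMergeRec
lemma pv_foldB : ∀ (rest : List (Int × Int)) (cur : Int × Int) (res : List (Int × Int)),
    pvFinishB (rest.foldl
      (fun (st : List (Int × Int) × Option (Int × Int)) (se : Int × Int) =>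
        match st.2 with
        | none => (st.1, some se)
        | some cur =>
          if se.1 ≤ cur.2 then (st.1, some (if se.2 > cur.2 then (cur.1, se.2) else cur))
          else (st.1 ++ [cur], some se))
      (res, some cur))
    = res ++ pvMergeRec cur rest := by
  intro rest
  induction rest with
  | nil => intro cur res; simp [pvFinishB, pvMergeRec]
  | cons se rest ih =>
    intro cur res
    simp only [List.foldl_cons, pvMergeRec]
    by_cases hc : se.1 ≤ cur.2
    · have hmax : (if se.2 > cur.2 then (cur.1, se.2) else cur) = (cur.1, max cur.2 se.2) := by
        obtain ⟨a, b⟩ := cur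
        by_cases hm : se.2 > b
        · rw [if_pos hm]; simp; omega
        · rw [if_neg hm]; simp; omega
      rw [if_pos hc]
      simp only [hmax]
      rw [ih, if_pos hc]
    · rw [if_neg hc, if_neg hc, ih]
      simp

lemma pv_mergeRec_lt : ∀ (rest : List (Int × Int)) (cur : Int × Int), cur.1 < cur.2 →
    (∀ p ∈ rest, p.1 < p.2) → ∀ p ∈ pvMergeRec cur rest, p.1 < p.2 := by
  intro rest
  induction rest with
  | nil => intro cur hcur _ p hp; simp [pvMergeRec] at hp; subst hp; exact hcur
  | cons se rest ih =>
    intro cur hcur hrest p hp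
    simp only [pvMergeRec] at hp
    by_cases hc : se.1 ≤ cur.2
    · rw [if_pos hc] at hp
      exact ih _ (by simp; omega) (fun q hq => hrest q (by simp [hq])) p hp
    · rw [if_neg hc] at hp
      rcases List.mem_cons.mp hp with h | h
      · subst h; exact hcur
      · exact ih _ (hrest se (by simp)) (fun q hq => hrest q (by simp [hq])) p h

-- the two merges agree on any list of nonempty intervals
lemma pv_merge_eq (L : List (Int × Int)) (hL : ∀ p ∈ L, p.1 < p.2) :
    merge_intervals_py L = pvMergeSorted (PySem.List.sorted2 L Prod.fst Prod.snd) := by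
  have hperm := PySem.List.sorted2_perm L Prod.fst Prod.snd false
  have hs : ∀ p ∈ PySem.List.sorted2 L Prod.fst Prod.snd, p.1 < p.2 := by
    intro p hp; exact hL p (hperm.mem_iff.mp hp)
  cases hcase : PySem.List.sorted2 L Prod.fst Prod.snd with
  | nil =>
    unfold merge_intervals_py
    rw [hcase]
    rfl
  | cons first rest =>
    rw [hcase] at hs
    have hA : merge_intervals_py L
        = ((pvMergeRec first rest).reverse ++ []).reverse.filter (fun p => decide (p.1 < p.2)) := by
      unfold merge_intervals_py
      rw [hcase, ← pv_foldA rest first []]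
    have hB : pvMergeSorted (first :: rest) = [] ++ pvMergeRec first rest :=
      pv_foldB rest first []
    rw [hA, hB]
    simp only [List.append_nil, List.reverse_reverse, List.nil_append]
    apply List.filter_eq_self.mpr
    intro p hp
    have hfirst : first.1 < first.2 := hs first (by simp)
    have hrest : ∀ q ∈ rest, q.1 < q.2 := fun q hq => hs q (by simp [hq])
    exact decide_eq_true (pv_mergeRec_lt rest first hfirst hrest p hp)

-- B's band loop turns the mapped row function into pvBandVal
lemma pv_B_fold (height : Int) (clipped : List (Int × Int × Int × Int)) :
    ∀ (bs : List Int) (f : Int → List (Int × Int)),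
      bs.Pairwise (· < ·) → (∀ x ∈ bs, 0 ≤ x ∧ x ≤ height) →
      (bs.zip bs.tail).foldl (pvStepB clipped height) ((PySem.List.pyRange 0 height 1).map f)
      = (PySem.List.pyRange 0 height 1).map
          (pvBandVal (fun b0 => pvMergeSorted (PySem.List.sorted2
            ((clipped.filter (fun c => decide (c.2.2.1 ≤ b0 ∧ b0 < c.2.2.2))).map (fun c => (c.1, c.2.1)))
            Prod.fst Prod.snd)) bs f) := by
  intro bs
  induction bs with
  | nil => intro f _ _; simp [pvBandVal]
  | cons u0 rest ih =>
    intro f hpw hin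
    match rest with
    | [] => simp [pvBandVal]
    | u1 :: rest =>
      simp only [List.tail_cons, List.zip_cons_cons, List.foldl_cons]
      have h0 : 0 ≤ u0 := (hin u0 (by simp)).1
      have h1 : u1 ≤ height := (hin u1 (by simp)).2
      have hguard : ¬ ((u0, u1).1 < 0 ∨ (u0, u1).2 > height) := by simp; omega
      have hstep : pvStepB clipped height ((PySem.List.pyRange 0 height 1).map f) (u0, u1)
          = (PySem.List.pyRange 0 height 1).map
              (fun z => if u0 ≤ z ∧ z < u1 then
                  pvMergeSorted (PySem.List.sorted2
                    ((clipped.filter (fun c => decide (c.2.2.1 ≤ u0 ∧ u0 < c.2.2.2))).map (fun c => (c.1, c.2.1)))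
                    Prod.fst Prod.snd)
                else f z) := by
        unfold pvStepB
        rw [if_neg hguard]
        have hfill := pv_fill height
          (fun _ _ => pvMergeSorted (PySem.List.sorted2
            ((clipped.filter (fun c => decide (c.2.2.1 ≤ u0 ∧ u0 < c.2.2.2))).map (fun c => (c.1, c.2.1)))
            Prod.fst Prod.snd))
          ((u1 - u0).toNat) u0 u1 f rfl h0 h1
        simp only [] at hfill
        exact hfill
      rw [hstep]
      simp only [List.tail_cons] at ih
      rw [ih _ (List.Pairwise.sublist (by simp) hpw) (fun x hx => hin x (by simp [hx]))]
      rfl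

lemma pv_bandVal_miss (v : Int → List (Int × Int)) :
    ∀ (bs : List Int) (f : Int → List (Int × Int)) (z : Int), (∀ x ∈ bs, z < x) →
      pvBandVal v bs f z = f z := by
  intro bs
  induction bs with
  | nil => intro f z _; rfl
  | cons u0 rest ih =>
    intro f z hlt
    match rest with
    | [] => rfl
    | u1 :: rest =>
      show pvBandVal v (u1 :: rest) _ z = f z
      rw [ih _ z (fun x hx => hlt x (by simp [hx]))]
      have : ¬ (u0 ≤ z ∧ z < u1) := by
        have := hlt u0 (by simp); omega
      simp [this]

lemma pv_bandVal_hit (v : Int → List (Int × Int)) :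
    ∀ (bs : List Int) (f : Int → List (Int × Int)) (z : Int), bs.Pairwise (· < ·) →
      (∃ a ∈ bs, a ≤ z) → (∃ b ∈ bs, z < b) →
      ∃ b0 ∈ bs, b0 ≤ z ∧ (∀ x ∈ bs, x ≤ z → x ≤ b0) ∧ pvBandVal v bs f z = v b0 := by
  intro bs
  induction bs with
  | nil => intro f z _ ha _; exact absurd ha (by simp)
  | cons u0 rest ih =>
    intro f z hpw ha hb
    match rest with
    | [] =>
      obtain ⟨a, ham, hale⟩ := ha
      obtain ⟨b, hbm, hblt⟩ := hb
      simp at ham hbm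
      omega
    | u1 :: rest =>
      have hu01 : u0 < u1 := (List.pairwise_cons.mp hpw).1 u1 (by simp)
      have htailge : ∀ x ∈ u1 :: rest, u1 ≤ x := by
        intro x hx
        rcases List.mem_cons.mp hx with h | h
        · omega
        · have := (List.pairwise_cons.mp ((List.pairwise_cons.mp hpw).2)).1 x h; omega
      by_cases hz : z < u1
      · -- the band is [u0, u1)
        have hu0z : u0 ≤ z := by
          obtain ⟨a, ham, hale⟩ := ha
          rcases List.mem_cons.mp ham with h | h
          · omega
          · have := htailge a h; omega
        refine ⟨u0, by simp, hu0z, ?_, ?_⟩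
        · intro x hx hxz
          rcases List.mem_cons.mp hx with h | h
          · omega
          · have := htailge x h; omega
        · show pvBandVal v (u1 :: rest) _ z = v u0
          rw [pv_bandVal_miss v _ _ z (fun x hx => by have := htailge x hx; omega)]
          simp [hu0z, hz]
      · -- recurse into the tail
        push Not at hz
        have hbtail : ∃ b ∈ u1 :: rest, z < b := by
          obtain ⟨b, hbm, hblt⟩ := hb
          rcases List.mem_cons.mp hbm with h | h
          · omega
          · exact ⟨b, h, hblt⟩
        obtain ⟨b0, hb0m, hb0le, hb0max, hb0val⟩ :=
          ih (fun w => if u0 ≤ w ∧ w < u1 then v u0 else f w) z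
            ((List.pairwise_cons.mp hpw).2) ⟨u1, by simp, hz⟩ hbtail
        refine ⟨b0, by simp [hb0m], hb0le, ?_, hb0val⟩
        intro x hx hxz
        rcases List.mem_cons.mp hx with h | h
        · have := htailge b0 hb0m; omega
        · exact hb0max x h hxz

-- what pvClip guarantees about every clipped rectangle
lemma pv_clip_mem (width height : Int) (rectangles : List (Int × Int × Int × Int))
    (c : Int × Int × Int × Int) (hc : c ∈ rectangles.filterMap (pvClip width height)) :
    c.1 < c.2.1 ∧ 0 ≤ c.2.2.1 ∧ c.2.2.1 < c.2.2.2 ∧ c.2.2.2 ≤ height := by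
  obtain ⟨r, _, hr⟩ := List.mem_filterMap.mp hc
  obtain ⟨c1, c2, c3, c4⟩ := c
  unfold pvClip at hr
  by_cases h : (max 0 (min width r.1) < max 0 (min width r.2.1)
      ∧ max 0 (min height r.2.2.1) < max 0 (min height r.2.2.2))
  · rw [if_pos h] at hr
    simp only [Option.some.injEq, Prod.mk.injEq] at hr
    obtain ⟨h1, h2, h3, h4⟩ := hr
    simp only []
    omega
  · rw [if_neg h] at hr
    exact absurd hr (by simp)

-- a fold of index-writes over the empty row list stays empty

-- a fold of index-writes over the empty row list stays empty
lemma pv_foldl_nil (l : List Int) (g : List (List (Int × Int)) → Int → List (Int × Int)) :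
    l.foldl (fun out y => PySem.List.pySetD out y (g out y)) ([] : List (List (Int × Int))) = [] := by
  induction l with
  | nil => rfl
  | cons a l ih =>
    simp only [List.foldl_cons]
    have hnil : PySem.List.pySetD ([] : List (List (Int × Int))) a (g [] a) = [] := by
      have := PySem.List.length_pySetD ([] : List (List (Int × Int))) a (g [] a)
      exact List.eq_nil_of_length_eq_zero (by simp_all)
    rw [hnil]
    exact ih

lemma pv_A_nil (width height : Int) (rects : List (Int × Int × Int × Int)) :
    rects.foldl (pvStepA width height) [] = [] := by
  induction rects with
  | nil => rfl
  | cons r rects ih =>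
    simp only [List.foldl_cons]
    have : pvStepA width height [] r = [] := by
      unfold pvStepA
      by_cases h : (max 0 (min width r.1) ≥ max 0 (min width r.2.1)
          ∨ max 0 (min height r.2.2.1) ≥ max 0 (min height r.2.2.2))
      · rw [if_pos h]
      · rw [if_neg h]
        exact pv_foldl_nil _ _
    rw [this]; exact ih

lemma pv_B_nil (clipped : List (Int × Int × Int × Int)) (height : Int) :
    ∀ (zs : List (Int × Int)), zs.foldl (pvStepB clipped height) [] = [] := by
  intro zs
  induction zs with
  | nil => rfl
  | cons bb zs ih =>
    simp only [List.foldl_cons]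
    have : pvStepB clipped height [] bb = [] := by
      unfold pvStepB
      by_cases h : (bb.1 < 0 ∨ bb.2 > height)
      · rw [if_pos h]
      · rw [if_neg h]
        exact pv_foldl_nil _ _
    rw [this]; exact ih

-- the unconditional equality of the two ports
lemma pv_main (rectangles : List (Int × Int × Int × Int)) (width height : Int) :
    rasterize_rectangles_py rectangles width height = rasterize_rectangles_py_alt rectangles width height := by
  by_cases hh : height ≤ 0
  · have hnil : PySem.List.pyRange 0 height 1 = [] := PySem.List.pyRange_one_eq_nil hh
    show (rectangles.foldl (pvStepA width height)
        ((PySem.List.pyRange 0 height 1).map (fun _ => ([] : List (Int × Int))))).map merge_intervals_py = _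
    rw [hnil]
    simp only [List.map_nil]
    rw [pv_A_nil]
    show ([] : List (List (Int × Int))) = _
    unfold rasterize_rectangles_py_alt
    rw [hnil]
    simp only [List.map_nil]
    rw [pv_B_nil _ _]
  · push Not at hh
    set clipped := rectangles.filterMap (pvClip width height) with hclipdef
    set E := [0, height] ++ clipped.map (fun c => c.2.2.1) ++ clipped.map (fun c => c.2.2.2) with hEdef
    set bounds := PySem.List.sorted (PySem.Set.ofList E) (fun x => x) false with hbdef
    have hpw : bounds.Pairwise (· < ·) := PySem.List.sorted_ofList_pairwise_lt E
    have hmemE : ∀ x, x ∈ bounds ↔ x ∈ E := by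
      intro x
      rw [hbdef, PySem.List.mem_sorted, PySem.Set.mem_ofList]
    have hclipfacts : ∀ c ∈ clipped, c.1 < c.2.1 ∧ 0 ≤ c.2.2.1 ∧ c.2.2.1 < c.2.2.2 ∧ c.2.2.2 ≤ height :=
      fun c hc => pv_clip_mem width height rectangles c hc
    have hrange : ∀ x ∈ bounds, 0 ≤ x ∧ x ≤ height := by
      intro x hx
      have := (hmemE x).mp hx
      rw [hEdef] at this
      simp only [List.mem_append, List.mem_cons, List.mem_map, List.not_mem_nil, or_false] at this
      rcases this with (h | h) | h
      · rcases h with h | h <;> omega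
      · obtain ⟨c, hc, rfl⟩ := h
        have := hclipfacts c hc; omega
      · obtain ⟨c, hc, rfl⟩ := h
        have := hclipfacts c hc; omega
    have h0mem : (0 : Int) ∈ bounds := (hmemE 0).mpr (by rw [hEdef]; simp)
    have hhmem : height ∈ bounds := (hmemE height).mpr (by rw [hEdef]; simp)
    -- rewrite both sides as maps over the row range
    show (rectangles.foldl (pvStepA width height)
        ((PySem.List.pyRange 0 height 1).map (fun _ => ([] : List (Int × Int))))).map merge_intervals_py
      = (bounds.zip bounds.tail).foldl (pvStepB clipped height)
          ((PySem.List.pyRange 0 height 1).map (fun _ => ([] : List (Int × Int))))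
    have hinit : (fun _ : Int => ([] : List (Int × Int))) = (fun z => pvSpecRow ([] : List (Int × Int × Int × Int)) z) := rfl
    rw [hinit, pv_A_rows width height rectangles [], List.map_map]
    rw [pv_B_fold height clipped bounds _ hpw hrange]
    apply List.map_congr_left
    intro z hz
    have hz' : 0 ≤ z ∧ z < height := (PySem.List.mem_pyRange_one).mp hz
    obtain ⟨b0, hb0m, hb0le, hb0max, hb0val⟩ :=
      pv_bandVal_hit (fun b0 => pvMergeSorted (PySem.List.sorted2
          ((clipped.filter (fun c => decide (c.2.2.1 ≤ b0 ∧ b0 < c.2.2.2))).map (fun c => (c.1, c.2.1)))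
          Prod.fst Prod.snd)) bounds (fun z => pvSpecRow ([] : List (Int × Int × Int × Int)) z) z hpw
        ⟨0, h0mem, hz'.1⟩ ⟨height, hhmem, hz'.2⟩
    simp only [Function.comp, List.nil_append]
    rw [hb0val]
    have hrow : pvSpecRow clipped b0 = pvSpecRow clipped z := by
      unfold pvSpecRow
      congr 1
      apply List.filter_congr
      intro c hc
      have hf := hclipfacts c hc
      have hy0m : c.2.2.1 ∈ bounds := (hmemE _).mpr (by
        rw [hEdef]
        exact List.mem_append.mpr (Or.inl (List.mem_append.mpr (Or.inr (List.mem_map.mpr ⟨c, hc, rfl⟩)))))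
      have hy1m : c.2.2.2 ∈ bounds := (hmemE _).mpr (by
        rw [hEdef]
        exact List.mem_append.mpr (Or.inr (List.mem_map.mpr ⟨c, hc, rfl⟩)))
      simp only [decide_eq_decide]
      constructor
      · rintro ⟨h1, h2⟩
        refine ⟨by omega, ?_⟩
        by_cases hcy : c.2.2.2 ≤ z
        · have := hb0max _ hy1m hcy; omega
        · omega
      · rintro ⟨h1, h2⟩
        have := hb0max _ hy0m h1
        omega
    show merge_intervals_py (pvSpecRow clipped z)
      = pvMergeSorted (PySem.List.sorted2 (pvSpecRow clipped b0) Prod.fst Prod.snd)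
    rw [hrow]
    apply pv_merge_eq
    intro p hp
    unfold pvSpecRow at hp
    obtain ⟨c, hc, rfl⟩ := List.mem_map.mp hp
    have := hclipfacts c (List.mem_of_mem_filter hc)
    exact this.1


-- ===== VERDICT (by name: the statement is the Claim_ definition above) =====
theorem rasterize_rectangles_py_spec : Claim_equal_rasterize_rectangles_py := by
  intro rectangles width height _
  unfold Spec_rasterize_rectangles_py
  exact pv_main rectangles width height
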